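-- pv_equiv track=rewrite | github.com/choijinhyuck/Algorithm | Solution/Summer, winter coding 2019/62050.py | solution
-- ===== SOURCE A (Python) =====
-- import heapq
--
-- def find(a, parent):
--     if parent[a] == a:
--         return parent[a]
--     else:
--         parent[a] = find(parent[a], parent)
--         return parent[a]
--
-- def union(a, b, parent):
--     A = find(a, parent)
--     B = find(b, parent)
--     if A > B:
--         parent[A] = B
--     elif A < B:
--         parent[B] = A
--     else:
--         return False
--     return True
--
-- def solution(land, height):
--     graph_1 = [
--         (abs(land[i][j] - land[i][j + 1]), len(land) * i + j + 1, len(land) * i + j + 2)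
--         for i in range(len(land))
--         for j in range(len(land) - 1)
--     ]
--     # 행별로 모든 높이차를 계산하고, 각 위치 좌표를 1차원으로 바꾸어서 저장
--     graph_2 = [
--         (abs(land[i][j] - land[i + 1][j]), len(land) * i + j + 1, len(land) * (i + 1) + j + 1)
--         for i in range(len(land) - 1)
--         for j in range(len(land))
--     ]
--     # 열별로 모든 높이차를 계산하고, 각 위치 좌표를 1차원으로 바꾸어서 저장
--
--     parent = [i for i in range(len(land) * len(land) + 1)]  # index는 자식, 값은 부모 index를 가리키는 리스트
--     graph = graph_1 + graph_2
--     heapq.heapify(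
--         graph
--     )  # 서로 인접한 모든 장소간 높이차와 위치 정보가 담긴 graph를 생성하고, 가장 작은 cost 값을 갖는 리스트부터 반환하도록 최소힙을 사용한다.
--
--     total_cost = 0
--     while graph:
--         cost, a, b = heapq.heappop(graph)
--         if union(a, b, parent):  # a와 b가 서로 다른 그룹일 경우
--             if cost > height:  # height 보다 cost가 높으면 total_cost에 cost 추가
--                 total_cost += cost
--
--     return total_cost
-- ===== SOURCE B (Python) =====
-- def solution(land, height):
--     n = len(land)
--     edges = []
--     for i in range(n):
--         for j in range(n - 1):
--             edges.append((abs(land[i][j] - land[i][j + 1]), i * n + j + 1, i * n + j + 2))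
--     for i in range(n - 1):
--         for j in range(n):
--             edges.append((abs(land[i][j] - land[i + 1][j]), i * n + j + 1, (i + 1) * n + j + 1))
--     comp = list(range(n * n + 1))
--     total = 0
--     for w, u, v in sorted(edges):
--         cu, cv = comp[u], comp[v]
--         if cu != cv:
--             comp = [cu if c == cv else c for c in comp]
--             if w > height:
--                 total += w
--     return total
-- ===== Notes on version B (the rewrite author's own statement) =====
-- stated objective: alternative
-- what changed: Replaces the heap + recursive path-compressing union-find Kruskal by a single per-cell edge sweep, one stdlib sort, and a flat component-label array merged by relabelling; no heap and no union-find forest remain.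
import Mathlib
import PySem

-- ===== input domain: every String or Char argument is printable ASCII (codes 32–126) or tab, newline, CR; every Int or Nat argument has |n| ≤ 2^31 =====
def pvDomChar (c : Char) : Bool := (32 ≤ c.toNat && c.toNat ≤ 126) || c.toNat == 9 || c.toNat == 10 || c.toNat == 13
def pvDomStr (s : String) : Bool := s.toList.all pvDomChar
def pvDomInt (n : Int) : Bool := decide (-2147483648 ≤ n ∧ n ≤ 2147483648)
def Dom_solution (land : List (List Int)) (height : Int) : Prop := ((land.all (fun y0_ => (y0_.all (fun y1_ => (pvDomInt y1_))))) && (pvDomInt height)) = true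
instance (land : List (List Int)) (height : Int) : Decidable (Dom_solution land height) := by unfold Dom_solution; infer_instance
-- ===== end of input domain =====

-- B replaces A's heap + recursive path-compressing union-find Kruskal by one stdlib sort plus a flat
-- component-label array merged by relabelling (objective: alternative; equal return values).

-- ===== PORT A =====
-- Python `find(a, parent)` (recursive, with path compression).  The mutated `parent` list is threaded
-- through explicitly; `fuel` only bounds the recursion depth (callers pass fuel = len(parent), which is
-- never exhausted on the parent forests A builds, where parent[a] ≤ a — see find_spec below).

def findA : List Int → Int → Nat → Int × List Int
  | parent, a, 0 => (a, parent)
  | parent, a, fuel+1 =>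
    let pa := PySem.List.pyGetD parent a 0
    if pa = a then (pa, parent)
    else
      let rp := findA parent pa fuel
      (rp.1, PySem.List.pySetD rp.2 a rp.1)

def unionA (a b : Int) (parent : List Int) : Bool × List Int :=
  let fa := findA parent a parent.length
  let fb := findA fa.2 b fa.2.length
  if fa.1 > fb.1 then (true, PySem.List.pySetD fb.2 fa.1 fb.1)
  else if fa.1 < fb.1 then (true, PySem.List.pySetD fb.2 fb.1 fa.1)
  else (false, fb.2)

-- the tuple (abs(land[i][j] - land[i][j+1]), len(land)*i+j+1, len(land)*i+j+2) of A's first comprehension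
def hEdge (land : List (List Int)) (i j : Int) : Int × Int × Int :=
  (|PySem.List.pyGetD (PySem.List.pyGetD land i []) j 0 - PySem.List.pyGetD (PySem.List.pyGetD land i []) (j+1) 0|,
   (land.length : Int) * i + j + 1, (land.length : Int) * i + j + 2)

-- the tuple of A's second comprehension
def vEdge (land : List (List Int)) (i j : Int) : Int × Int × Int :=
  (|PySem.List.pyGetD (PySem.List.pyGetD land i []) j 0 - PySem.List.pyGetD (PySem.List.pyGetD land (i+1) []) j 0|,
   (land.length : Int) * i + j + 1, (land.length : Int) * (i+1) + j + 1)

-- Python compares the (cost, a, b) triples lexicographically (heap order in A, sorted() in B).  This Int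
-- key realises exactly that order on the triples both programs build: their id components lie in
-- [1, n*n+1] ⊂ [0, n*n+2) and their first component is an absolute value, hence nonnegative.
def edgeKey (n : Int) (e : Int × Int × Int) : Int := (e.1 * (n*n+2) + e.2.1) * (n*n+2) + e.2.2

-- body of A's while loop (one heappop processed)
def stepA (height : Int) (st : List Int × Int) (e : Int × Int × Int) : List Int × Int :=
  let ub := unionA e.2.1 e.2.2 st.1
  (ub.2, if ub.1 = true then (if e.1 > height then st.2 + e.1 else st.2) else st.2)

-- `heapq.heapify(graph)` + popping until empty yields the stored triples in ascending Python-tuple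
-- order (heappop always returns a minimal element), modelled exactly by iterating the sorted list.
def solution (land : List (List Int)) (height : Int) : Int :=
  let n : Int := (land.length : Int)
  let graph_1 := (PySem.List.pyRange 0 n).flatMap (fun i => (PySem.List.pyRange 0 (n-1)).map (fun j => hEdge land i j))
  let graph_2 := (PySem.List.pyRange 0 (n-1)).flatMap (fun i => (PySem.List.pyRange 0 n).map (fun j => vEdge land i j))
  let parent : List Int := PySem.List.pyRange 0 (n * n + 1)
  let graph := graph_1 ++ graph_2
  let order := PySem.List.sorted graph (edgeKey n) false
  (order.foldl (stepA height) (parent, 0)).2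

-- ===== PORT B =====
-- B's right-neighbour edge tuple (flat ids computed as i*n+j+1)
def hEdgeB (land : List (List Int)) (i j : Int) : Int × Int × Int :=
  (|PySem.List.pyGetD (PySem.List.pyGetD land i []) j 0 - PySem.List.pyGetD (PySem.List.pyGetD land i []) (j+1) 0|,
   i * (land.length : Int) + j + 1, i * (land.length : Int) + j + 2)

-- B's down-neighbour edge tuple
def vEdgeB (land : List (List Int)) (i j : Int) : Int × Int × Int :=
  (|PySem.List.pyGetD (PySem.List.pyGetD land i []) j 0 - PySem.List.pyGetD (PySem.List.pyGetD land (i+1) []) j 0|,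
   i * (land.length : Int) + j + 1, (i+1) * (land.length : Int) + j + 1)

-- body of B's for loop: relabel v's component to u's label when the labels differ
def stepB (height : Int) (st : List Int × Int) (e : Int × Int × Int) : List Int × Int :=
  let cu := PySem.List.pyGetD st.1 e.2.1 0
  let cv := PySem.List.pyGetD st.1 e.2.2 0
  if cu ≠ cv then
    (st.1.map (fun c => if c = cv then cu else c), if e.1 > height then st.2 + e.1 else st.2)
  else st

-- B's copy of the lexicographic tuple key (see the note at edgeKey)
def edgeKeyB (n : Int) (e : Int × Int × Int) : Int := (e.1 * (n*n+2) + e.2.1) * (n*n+2) + e.2.2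

-- `sorted(edges)`: the same Python tuple order, realised by the same injective key
def solution_alt (land : List (List Int)) (height : Int) : Int :=
  let n : Int := (land.length : Int)
  let edges1 := (PySem.List.pyRange 0 n).foldl (fun acc i =>
    (PySem.List.pyRange 0 (n-1)).foldl (fun acc j => acc ++ [hEdgeB land i j]) acc) []
  let edges := (PySem.List.pyRange 0 (n-1)).foldl (fun acc i =>
    (PySem.List.pyRange 0 n).foldl (fun acc j => acc ++ [vEdgeB land i j]) acc) edges1
  let comp : List Int := PySem.List.pyRange 0 (n * n + 1)
  ((PySem.List.sorted edges (edgeKeyB n) false).foldl (stepB height) (comp, 0)).2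

-- ===== PRECONDITION & SPEC =====
-- Pre_ excludes exactly the inputs on which Python A raises IndexError: n = len(land) ≥ 2 while some
-- row is shorter than n (A indexes land[i][j] for all j < n there; Python B raises on the same inputs).
def Pre_solution (land : List (List Int)) (height : Int) : Prop :=
  land.length ≤ 1 ∨ ∀ row ∈ land, land.length ≤ row.length
instance (land : List (List Int)) (height : Int) : Decidable (Pre_solution land height) := by
  unfold Pre_solution; infer_instance

def pvWitness_solution : List (List Int) × Int := ([[1, 3], [2, 10]], 2)

def Spec_solution (land : List (List Int)) (height : Int) (out : Int) : Prop := out = solution_alt land height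
instance (land : List (List Int)) (height : Int) (out : Int) : Decidable (Spec_solution land height out) := by
  unfold Spec_solution; infer_instance

-- ===== CLAIM (what is proved, stated in full; the proofs are below) =====
def Claim_equal_solution : Prop := ∀ (land : List (List Int)) (height : Int), Dom_solution land height → Pre_solution land height → Spec_solution land height (solution land height)

-- ===== LEMMAS AND PROOFS =====

-- `parent` lists as A builds them: every entry is a nonnegative index pointing no higher than itself

def ValidP (p : List Int) : Prop :=
  ∀ x : Int, 0 ≤ x → x < p.length → 0 ≤ PySem.List.pyGetD p x 0 ∧ PySem.List.pyGetD p x 0 ≤ x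

-- representative of x in the parent forest, by chain chasing (x.toNat+1 steps always suffice)
def rootF (p : List Int) : Nat → Int → Int
  | 0, x => x
  | f+1, x =>
    let px := PySem.List.pyGetD p x 0
    if px = x then x else rootF p f px

def root (p : List Int) (x : Int) : Int := rootF p (x.toNat + 1) x

lemma root_of_self {p : List Int} {x : Int} (h : PySem.List.pyGetD p x 0 = x) : root p x = x := by
  simp [root, rootF, h]

lemma get_set {p : List Int} {a v x : Int} (ha0 : 0 ≤ a) (hal : a < p.length)
    (hx0 : 0 ≤ x) (hxl : x < p.length) :
    PySem.List.pyGetD (PySem.List.pySetD p a v) x 0 = if x = a then v else PySem.List.pyGetD p x 0 := by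
  rw [PySem.List.pySetD_of_nonneg _ _ ha0,
      PySem.List.pyGetD_eq_getElem _ _ hx0 (by simpa using hxl),
      ]
  rcases eq_or_ne x a with rfl | hne
  · simp
  · rw [if_neg hne, PySem.List.pyGetD_eq_getElem _ _ hx0 hxl]
    have h2 : a.toNat ≠ x.toNat := by omega
    simp [h2]

lemma get_map_inrange {c : List Int} (f : Int → Int) {x : Int} (hx0 : 0 ≤ x) (hxl : x < c.length) :
    PySem.List.pyGetD (c.map f) x 0 = f (PySem.List.pyGetD c x 0) := by
  rw [PySem.List.pyGetD_eq_getElem _ _ hx0 (by simpa using hxl),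
      PySem.List.pyGetD_eq_getElem _ _ hx0 hxl]
  simp

lemma length_pyRange0 (N : Nat) : (PySem.List.pyRange 0 (N : Int)).length = N := by
  simp [PySem.List.pyRange_zero_natCast]

lemma get_pyRange0 {N : Nat} {x : Int} (hx0 : 0 ≤ x) (hxl : x < (N : Int)) :
    PySem.List.pyGetD (PySem.List.pyRange 0 (N : Int)) x 0 = x := by
  rw [PySem.List.pyRange_zero_natCast,
      PySem.List.pyGetD_eq_getElem _ _ hx0 (by simpa using hxl)]
  simp
  omega

lemma rootF_eq_root {p : List Int} (hv : ValidP p) :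
    ∀ (m : Nat) (x : Int), x.toNat ≤ m → 0 ≤ x → x < p.length →
    ∀ f, x.toNat < f → rootF p f x = root p x := by
  intro m
  induction m with
  | zero =>
    intro x hm hx0 hxl f hf
    have hx : x = 0 := by omega
    subst hx
    have h := hv 0 le_rfl (by omega)
    have h0 : PySem.List.pyGetD p 0 0 = 0 := le_antisymm h.2 h.1
    obtain ⟨f', rfl⟩ : ∃ f', f = f' + 1 := ⟨f - 1, by omega⟩
    simp [rootF, h0, root]
  | succ m ih =>
    intro x hm hx0 hxl f hf
    obtain ⟨f', rfl⟩ : ∃ f', f = f' + 1 := ⟨f - 1, by omega⟩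
    by_cases hself : PySem.List.pyGetD p x 0 = x
    · simp [rootF, hself, root_of_self hself]
    · have hb := hv x hx0 hxl
      have hlt : PySem.List.pyGetD p x 0 < x := lt_of_le_of_ne hb.2 hself
      have h1 : rootF p (f' + 1) x = rootF p f' (PySem.List.pyGetD p x 0) := by
        simp only [rootF]
        rw [if_neg hself]
      have h2 : root p x = rootF p x.toNat (PySem.List.pyGetD p x 0) := by
        rw [root]
        simp only [rootF]
        rw [if_neg hself]
      rw [h1, h2, ih _ (by omega) hb.1 (by omega) f' (by omega),
          ih _ (by omega) hb.1 (by omega) x.toNat (by omega)]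

lemma root_step {p : List Int} (hv : ValidP p) {x : Int} (hx0 : 0 ≤ x) (hxl : x < p.length)
    (hne : PySem.List.pyGetD p x 0 ≠ x) : root p x = root p (PySem.List.pyGetD p x 0) := by
  have hb := hv x hx0 hxl
  have hlt : PySem.List.pyGetD p x 0 < x := lt_of_le_of_ne hb.2 hne
  have h2 : root p x = rootF p x.toNat (PySem.List.pyGetD p x 0) := by
    rw [root]
    simp only [rootF]
    rw [if_neg hne]
  rw [h2, rootF_eq_root hv x.toNat _ (by omega) hb.1 (by omega) x.toNat (by omega)]

lemma root_spec {p : List Int} (hv : ValidP p) :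
    ∀ (m : Nat) (x : Int), x.toNat ≤ m → 0 ≤ x → x < p.length →
    0 ≤ root p x ∧ root p x ≤ x ∧ PySem.List.pyGetD p (root p x) 0 = root p x := by
  intro m
  induction m with
  | zero =>
    intro x hm hx0 hxl
    have hx : x = 0 := by omega
    subst hx
    have h := hv 0 le_rfl (by omega)
    have h0 : PySem.List.pyGetD p 0 0 = 0 := le_antisymm h.2 h.1
    rw [root_of_self h0]
    exact ⟨le_rfl, le_rfl, h0⟩
  | succ m ih =>
    intro x hm hx0 hxl
    by_cases hself : PySem.List.pyGetD p x 0 = x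
    · rw [root_of_self hself]; exact ⟨hx0, le_rfl, hself⟩
    · have hb := hv x hx0 hxl
      have hlt : PySem.List.pyGetD p x 0 < x := lt_of_le_of_ne hb.2 hself
      rw [root_step hv hx0 hxl hself]
      have := ih (PySem.List.pyGetD p x 0) (by omega) hb.1 (by omega)
      exact ⟨this.1, le_trans this.2.1 (le_of_lt hlt), this.2.2⟩

lemma root_spec' {p : List Int} (hv : ValidP p) {x : Int} (hx0 : 0 ≤ x) (hxl : x < p.length) :
    0 ≤ root p x ∧ root p x ≤ x ∧ PySem.List.pyGetD p (root p x) 0 = root p x :=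
  root_spec hv x.toNat x le_rfl hx0 hxl

lemma root_root {p : List Int} (hv : ValidP p) {x : Int} (hx0 : 0 ≤ x) (hxl : x < p.length) :
    root p (root p x) = root p x :=
  root_of_self (root_spec' hv hx0 hxl).2.2

lemma root_eq_self_iff {p : List Int} (hv : ValidP p) {x : Int} (hx0 : 0 ≤ x) (hxl : x < p.length) :
    root p x = x ↔ PySem.List.pyGetD p x 0 = x := by
  constructor
  · intro h
    by_contra hne
    have hb := hv x hx0 hxl
    have hlt : PySem.List.pyGetD p x 0 < x := lt_of_le_of_ne hb.2 hne
    have h2 := root_step hv hx0 hxl hne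
    have h3 := root_spec' hv (x := PySem.List.pyGetD p x 0) hb.1 (by omega)
    omega
  · exact root_of_self

lemma valid_set {p : List Int} (hv : ValidP p) {a v : Int} (ha0 : 0 ≤ a) (hal : a < p.length)
    (hv0 : 0 ≤ v) (hva : v ≤ a) : ValidP (PySem.List.pySetD p a v) := by
  intro x hx0 hxl
  rw [PySem.List.length_pySetD] at hxl
  rw [get_set ha0 hal hx0 hxl]
  split
  · next h => subst h; exact ⟨hv0, hva⟩
  · exact hv x hx0 hxl

lemma root_set_self {p : List Int} (hv : ValidP p) {a : Int} (ha0 : 0 ≤ a) (hal : a < p.length) :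
    ∀ (m : Nat) (x : Int), x.toNat ≤ m → 0 ≤ x → x < p.length →
      root (PySem.List.pySetD p a (root p a)) x = root p x := by
  have hr := root_spec' hv ha0 hal
  have hq : ValidP (PySem.List.pySetD p a (root p a)) := valid_set hv ha0 hal hr.1 hr.2.1
  have hlen : (PySem.List.pySetD p a (root p a)).length = p.length := PySem.List.length_pySetD _ _ _
  intro m
  induction m with
  | zero =>
    intro x hm hx0 hxl
    have hx : x = 0 := by omega
    subst hx
    have h := hv 0 le_rfl (by omega)
    have h0 : PySem.List.pyGetD p 0 0 = 0 := le_antisymm h.2 h.1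
    have hg : PySem.List.pyGetD (PySem.List.pySetD p a (root p a)) 0 0 = 0 := by
      rw [get_set ha0 hal le_rfl (by omega)]
      rcases eq_or_ne (0 : Int) a with rfl | hne
      · rw [if_pos rfl]
        exact le_antisymm hr.2.1 hr.1
      · rw [if_neg hne]
        exact h0
    rw [root_of_self hg, root_of_self h0]
  | succ m ih =>
    intro x hm hx0 hxl
    rcases eq_or_ne x a with rfl | hne
    · -- entry x = a now points directly at root p a
      have hg : PySem.List.pyGetD (PySem.List.pySetD p x (root p x)) x 0 = root p x := by
        rw [get_set ha0 hal hx0 hxl, if_pos rfl]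
      rcases eq_or_ne (root p x) x with he | hne2
      · rw [he] at hg
        rw [he, root_of_self hg]
      · have h1 := root_step hq hx0 (x := x) (by rw [hlen]; exact hxl) (by rw [hg]; exact hne2)
        rw [hg] at h1
        have hfix : PySem.List.pyGetD (PySem.List.pySetD p x (root p x)) (root p x) 0 = root p x := by
          rw [get_set ha0 hal hr.1 (by omega), if_neg hne2]
          exact hr.2.2
        rw [h1, root_of_self hfix]
    · by_cases hself : PySem.List.pyGetD p x 0 = x
      · have hg : PySem.List.pyGetD (PySem.List.pySetD p a (root p a)) x 0 = x := by
          rw [get_set ha0 hal hx0 hxl, if_neg hne]; exact hself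
        rw [root_of_self hg, root_of_self hself]
      · have hb := hv x hx0 hxl
        have hlt : PySem.List.pyGetD p x 0 < x := lt_of_le_of_ne hb.2 hself
        have hg : PySem.List.pyGetD (PySem.List.pySetD p a (root p a)) x 0 = PySem.List.pyGetD p x 0 := by
          rw [get_set ha0 hal hx0 hxl, if_neg hne]
        have h1 := root_step hq hx0 (x := x) (by rw [hlen]; exact hxl) (by rw [hg]; exact hself)
        rw [hg] at h1
        rw [h1, ih _ (by omega) hb.1 (by omega), root_step hv hx0 hxl hself]

lemma root_set_merge {p : List Int} (hv : ValidP p) {a b : Int}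
    (ha0 : 0 ≤ a) (hal : a < p.length) (hb0 : 0 ≤ b) (hbl : b < p.length)
    (hra : PySem.List.pyGetD p a 0 = a) (hrb : PySem.List.pyGetD p b 0 = b)
    (hba : b ≤ a) (hne : b ≠ a) :
    ∀ (m : Nat) (x : Int), x.toNat ≤ m → 0 ≤ x → x < p.length →
      root (PySem.List.pySetD p a b) x = if root p x = a then b else root p x := by
  have hq : ValidP (PySem.List.pySetD p a b) := valid_set hv ha0 hal hb0 hba
  have hlen : (PySem.List.pySetD p a b).length = p.length := PySem.List.length_pySetD _ _ _
  have hfixb : PySem.List.pyGetD (PySem.List.pySetD p a b) b 0 = b := by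
    rw [get_set ha0 hal hb0 hbl, if_neg hne]; exact hrb
  intro m
  induction m with
  | zero =>
    intro x hm hx0 hxl
    have hx : x = 0 := by omega
    subst hx
    have h := hv 0 le_rfl (by omega)
    have h0 : PySem.List.pyGetD p 0 0 = 0 := le_antisymm h.2 h.1
    rw [root_of_self h0]
    rcases eq_or_ne (0 : Int) a with rfl | hzn
    · -- a = 0: then b ≤ 0 and b ≠ 0 contradicts 0 ≤ b
      omega
    · have hg : PySem.List.pyGetD (PySem.List.pySetD p a b) 0 0 = 0 := by
        rw [get_set ha0 hal le_rfl (by omega), if_neg hzn]; exact h0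
      rw [root_of_self hg, if_neg hzn]
  | succ m ih =>
    intro x hm hx0 hxl
    rcases eq_or_ne x a with rfl | hxa
    · have hg : PySem.List.pyGetD (PySem.List.pySetD p x b) x 0 = b := by
        rw [get_set ha0 hal hx0 hxl, if_pos rfl]
      have h1 := root_step hq hx0 (x := x) (by rw [hlen]; exact hxl) (by rw [hg]; exact hne)
      rw [hg] at h1
      rw [h1, root_of_self hfixb, if_pos (root_of_self hra)]
    · by_cases hself : PySem.List.pyGetD p x 0 = x
      · have hg : PySem.List.pyGetD (PySem.List.pySetD p a b) x 0 = x := by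
          rw [get_set ha0 hal hx0 hxl, if_neg hxa]; exact hself
        rw [root_of_self hg, root_of_self hself, if_neg hxa]
      · have hb' := hv x hx0 hxl
        have hlt : PySem.List.pyGetD p x 0 < x := lt_of_le_of_ne hb'.2 hself
        have hg : PySem.List.pyGetD (PySem.List.pySetD p a b) x 0 = PySem.List.pyGetD p x 0 := by
          rw [get_set ha0 hal hx0 hxl, if_neg hxa]
        have h1 := root_step hq hx0 (x := x) (by rw [hlen]; exact hxl) (by rw [hg]; exact hself)
        rw [hg] at h1
        rw [h1, ih _ (by omega) hb'.1 (by omega), root_step hv hx0 hxl hself]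

lemma find_spec : ∀ (fuel : Nat) (p : List Int) (a : Int), ValidP p → 0 ≤ a → a < p.length →
    a.toNat < fuel →
    (findA p a fuel).1 = root p a ∧ ValidP (findA p a fuel).2 ∧
    (findA p a fuel).2.length = p.length ∧
    (∀ y : Int, 0 ≤ y → y < p.length → root (findA p a fuel).2 y = root p y) := by
  intro fuel
  induction fuel with
  | zero => intro p a hv ha0 hal hf; omega
  | succ fuel ih =>
    intro p a hv ha0 hal hf
    by_cases hself : PySem.List.pyGetD p a 0 = a
    · simp only [findA]
      rw [if_pos hself]
      exact ⟨by rw [hself]; exact (root_of_self hself).symm, hv, rfl, fun y _ _ => rfl⟩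
    · have hb := hv a ha0 hal
      have hlt : PySem.List.pyGetD p a 0 < a := lt_of_le_of_ne hb.2 hself
      have hrec := ih p (PySem.List.pyGetD p a 0) hv hb.1 (by omega) (by omega)
      simp only [findA]
      rw [if_neg hself]
      set rp := findA p (PySem.List.pyGetD p a 0) fuel with hrp
      obtain ⟨hr1, hr2, hr3, hr4⟩ := hrec
      have hstep : root p (PySem.List.pyGetD p a 0) = root p a := (root_step hv ha0 hal hself).symm
      -- rp.1 = root p a, and it is the root of rp.2 at a
      have hroota : root rp.2 a = rp.1 := by
        rw [hr4 a ha0 hal, hr1, hstep]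
      refine ⟨by rw [hr1, hstep], ?_, ?_, ?_⟩
      · -- validity of set rp.2 a rp.1
        have := valid_set hr2 (a := a) (v := rp.1) ha0 (by rw [hr3]; exact hal) ?_ ?_
        · exact this
        · rw [hr1, hstep]
          exact (root_spec' hv ha0 hal).1
        · rw [hr1, hstep]
          exact (root_spec' hv ha0 hal).2.1
      · rw [PySem.List.length_pySetD, hr3]
      · intro y hy0 hyl
        have h1 : root (PySem.List.pySetD rp.2 a (root rp.2 a)) y = root rp.2 y :=
          root_set_self hr2 ha0 (by rw [hr3]; exact hal) y.toNat y le_rfl hy0 (by rw [hr3]; exact hyl)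
        rw [hroota] at h1
        rw [h1, hr4 y hy0 hyl]

lemma union_spec {p : List Int} (hv : ValidP p) {a b : Int}
    (ha0 : 0 ≤ a) (hal : a < p.length) (hb0 : 0 ≤ b) (hbl : b < p.length) :
    (unionA a b p).1 = decide (root p a ≠ root p b) ∧ ValidP (unionA a b p).2 ∧
    (unionA a b p).2.length = p.length ∧
    (∀ y : Int, 0 ≤ y → y < p.length →
      root (unionA a b p).2 y =
        if root p a = root p b then root p y
        else if root p y = root p a ∨ root p y = root p b then min (root p a) (root p b)
        else root p y) := by
  obtain ⟨hfa1, hfa2, hfa3, hfa4⟩ := find_spec p.length p a hv ha0 hal (by omega)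
  have hbl2 : b < ((findA p a p.length).2.length : Int) := by rw [hfa3]; exact hbl
  obtain ⟨hfb1, hfb2, hfb3, hfb4⟩ :=
    find_spec (findA p a p.length).2.length (findA p a p.length).2 b hfa2 hb0 hbl2 (by omega)
  have hlenq : (findA (findA p a p.length).2 b (findA p a p.length).2.length).2.length = p.length := by
    rw [hfb3, hfa3]
  have hrootsq : ∀ y : Int, 0 ≤ y → y < p.length →
      root (findA (findA p a p.length).2 b (findA p a p.length).2.length).2 y = root p y := by
    intro y hy0 hyl
    rw [hfb4 y hy0 (by rw [hfa3]; exact hyl), hfa4 y hy0 hyl]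
  have hfb1' : (findA (findA p a p.length).2 b (findA p a p.length).2.length).1 = root p b := by
    rw [hfb1, hfa4 b hb0 hbl]
  have hA0 := root_spec' hv ha0 hal
  have hB0 := root_spec' hv hb0 hbl
  have hA0l : root p a < p.length := by omega
  have hB0l : root p b < p.length := by omega
  have hfixA : PySem.List.pyGetD (findA (findA p a p.length).2 b (findA p a p.length).2.length).2 (root p a) 0 = root p a := by
    refine (root_eq_self_iff hfb2 hA0.1 (by rw [hlenq]; exact hA0l)).mp ?_
    rw [hrootsq _ hA0.1 hA0l]
    exact root_root hv ha0 hal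
  have hfixB : PySem.List.pyGetD (findA (findA p a p.length).2 b (findA p a p.length).2.length).2 (root p b) 0 = root p b := by
    refine (root_eq_self_iff hfb2 hB0.1 (by rw [hlenq]; exact hB0l)).mp ?_
    rw [hrootsq _ hB0.1 hB0l]
    exact root_root hv hb0 hbl
  simp only [unionA]
  rw [hfa1, hfb1']
  rcases lt_trichotomy (root p a) (root p b) with hlt | heq | hgt
  · rw [if_neg (by omega), if_pos hlt]
    refine ⟨by simp [ne_of_lt hlt], ?_, ?_, ?_⟩
    · exact valid_set hfb2 hB0.1 (by rw [hlenq]; exact hB0l) hA0.1 (le_of_lt hlt)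
    · rw [PySem.List.length_pySetD, hlenq]
    · intro y hy0 hyl
      rw [root_set_merge hfb2 hB0.1 (by rw [hlenq]; exact hB0l) hA0.1 (by rw [hlenq]; exact hA0l)
            hfixB hfixA (le_of_lt hlt) (by omega) y.toNat y le_rfl hy0 (by rw [hlenq]; exact hyl),
          hrootsq y hy0 hyl]
      split_ifs <;> omega
  · rw [if_neg (by omega), if_neg (by omega)]
    refine ⟨by simp [heq], hfb2, hlenq, ?_⟩
    intro y hy0 hyl
    rw [hrootsq y hy0 hyl, if_pos heq]
  · rw [if_pos hgt]
    refine ⟨by simp [(ne_of_gt hgt)], ?_, ?_, ?_⟩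
    · exact valid_set hfb2 hA0.1 (by rw [hlenq]; exact hA0l) hB0.1 (le_of_lt hgt)
    · rw [PySem.List.length_pySetD, hlenq]
    · intro y hy0 hyl
      rw [root_set_merge hfb2 hA0.1 (by rw [hlenq]; exact hA0l) hB0.1 (by rw [hlenq]; exact hB0l)
            hfixA hfixB (le_of_lt hgt) (by omega) y.toNat y le_rfl hy0 (by rw [hlenq]; exact hyl),
          hrootsq y hy0 hyl]
      split_ifs <;> omega

-- the simulation relation: A's parent forest and B's label array induce the same partition
def InvP (p c : List Int) : Prop :=
  ValidP p ∧ c.length = p.length ∧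
  ∀ x y : Int, 0 ≤ x → x < p.length → 0 ≤ y → y < p.length →
    (root p x = root p y ↔ PySem.List.pyGetD c x 0 = PySem.List.pyGetD c y 0)

lemma label_iff {Rx Ry A B gx gy cu cv : Int}
    (_hAB : A ≠ B) (_hcc : cu ≠ cv)
    (Fxu : Rx = A ↔ gx = cu) (Fxv : Rx = B ↔ gx = cv)
    (Fyu : Ry = A ↔ gy = cu) (Fyv : Ry = B ↔ gy = cv)
    (Fxy : Rx = Ry ↔ gx = gy) :
    ((if Rx = A ∨ Rx = B then min A B else Rx) = (if Ry = A ∨ Ry = B then min A B else Ry))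
      ↔ ((if gx = cv then cu else gx) = (if gy = cv then cu else gy)) := by
  by_cases h1 : Rx = A ∨ Rx = B <;> by_cases h2 : Ry = A ∨ Ry = B
  · rw [if_pos h1, if_pos h2]
    have hx : (if gx = cv then cu else gx) = cu := by
      rcases h1 with h | h
      · have := Fxu.mp h
        split_ifs <;> omega
      · rw [if_pos (Fxv.mp h)]
    have hy : (if gy = cv then cu else gy) = cu := by
      rcases h2 with h | h
      · have := Fyu.mp h
        split_ifs <;> omega
      · rw [if_pos (Fyv.mp h)]
    rw [hx, hy]
    simp
  · rw [if_pos h1, if_neg h2]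
    have hx : (if gx = cv then cu else gx) = cu := by
      rcases h1 with h | h
      · have := Fxu.mp h
        split_ifs <;> omega
      · rw [if_pos (Fxv.mp h)]
    have hyu : gy ≠ cu := fun h => h2 (Or.inl (Fyu.mpr h))
    have hyv : gy ≠ cv := fun h => h2 (Or.inr (Fyv.mpr h))
    rw [hx, if_neg hyv]
    constructor
    · intro h
      exfalso
      rcases h1 with h' | h' <;> omega
    · intro h
      exact absurd h.symm hyu
  · rw [if_neg h1, if_pos h2]
    have hy : (if gy = cv then cu else gy) = cu := by
      rcases h2 with h | h
      · have := Fyu.mp h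
        split_ifs <;> omega
      · rw [if_pos (Fyv.mp h)]
    have hxu : gx ≠ cu := fun h => h1 (Or.inl (Fxu.mpr h))
    have hxv : gx ≠ cv := fun h => h1 (Or.inr (Fxv.mpr h))
    rw [hy, if_neg hxv]
    constructor
    · intro h
      exfalso
      rcases h2 with h' | h' <;> omega
    · intro h
      exact absurd h hxu
  · have hxv : gx ≠ cv := fun h => h1 (Or.inr (Fxv.mpr h))
    have hyv : gy ≠ cv := fun h => h2 (Or.inr (Fyv.mpr h))
    rw [if_neg h1, if_neg h2, if_neg hxv, if_neg hyv]
    exact Fxy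

lemma fold_eq (h : Int) : ∀ (L : List (Int × Int × Int)) (p c : List Int) (t : Int),
    InvP p c →
    (∀ e ∈ L, 0 ≤ e.2.1 ∧ e.2.1 < p.length ∧ 0 ≤ e.2.2 ∧ e.2.2 < p.length) →
    (L.foldl (stepA h) (p, t)).2 = (L.foldl (stepB h) (c, t)).2 := by
  intro L
  induction L with
  | nil => intro p c t _ _; rfl
  | cons e L ih =>
    intro p c t hInv hb
    obtain ⟨hu0, hul, hv0, hvl⟩ := hb e (List.mem_cons_self)
    obtain ⟨hI1, hI2, hI3⟩ := hInv
    obtain ⟨hU1, hU2, hU3, hU4⟩ := union_spec hI1 hu0 hul hv0 hvl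
    have hiff := hI3 e.2.1 e.2.2 hu0 hul hv0 hvl
    simp only [List.foldl_cons]
    by_cases hr : root p e.2.1 = root p e.2.2
    · have hcc : PySem.List.pyGetD c e.2.1 0 = PySem.List.pyGetD c e.2.2 0 := hiff.mp hr
      have hsA : stepA h (p, t) e = ((unionA e.2.1 e.2.2 p).2, t) := by
        simp [stepA, hU1, hr]
      have hsB : stepB h (c, t) e = (c, t) := by
        simp [stepB, hcc]
      rw [hsA, hsB]
      refine ih _ _ _ ⟨hU2, by rw [hU3]; exact hI2, ?_⟩ ?_
      · intro x y hx0 hxl hy0 hyl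
        rw [hU3] at hxl hyl
        rw [hU4 x hx0 hxl, hU4 y hy0 hyl, if_pos hr, if_pos hr]
        exact hI3 x y hx0 hxl hy0 hyl
      · intro e' he'
        have := hb e' (List.mem_cons_of_mem _ he')
        rw [hU3]
        exact this
    · have hcc : PySem.List.pyGetD c e.2.1 0 ≠ PySem.List.pyGetD c e.2.2 0 := fun hh => hr (hiff.mpr hh)
      have hsA : stepA h (p, t) e =
          ((unionA e.2.1 e.2.2 p).2, if e.1 > h then t + e.1 else t) := by
        simp [stepA, hU1, hr]
      have hsB : stepB h (c, t) e =
          (c.map (fun x => if x = PySem.List.pyGetD c e.2.2 0 then PySem.List.pyGetD c e.2.1 0 else x),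
           if e.1 > h then t + e.1 else t) := by
        simp [stepB, hcc]
      rw [hsA, hsB]
      refine ih _ _ _ ⟨hU2, by simp [hU3, hI2], ?_⟩ ?_
      · intro x y hx0 hxl hy0 hyl
        rw [hU3] at hxl hyl
        rw [hU4 x hx0 hxl, hU4 y hy0 hyl, if_neg hr, if_neg hr,
            get_map_inrange _ hx0 (by rw [hI2]; exact hxl),
            get_map_inrange _ hy0 (by rw [hI2]; exact hyl)]
        exact label_iff hr hcc
          (hI3 x e.2.1 hx0 hxl hu0 hul) (hI3 x e.2.2 hx0 hxl hv0 hvl)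
          (hI3 y e.2.1 hy0 hyl hu0 hul) (hI3 y e.2.2 hy0 hyl hv0 hvl)
          (hI3 x y hx0 hxl hy0 hyl)
      · intro e' he'
        have := hb e' (List.mem_cons_of_mem _ he')
        rw [hU3]
        exact this

lemma inv_init (N : Nat) : InvP (PySem.List.pyRange 0 (N : Int)) (PySem.List.pyRange 0 (N : Int)) := by
  have hlen := length_pyRange0 N
  have hv : ValidP (PySem.List.pyRange 0 (N : Int)) := by
    intro x hx0 hxl
    rw [hlen] at hxl
    rw [get_pyRange0 hx0 hxl]
    exact ⟨hx0, le_rfl⟩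
  refine ⟨hv, rfl, ?_⟩
  intro x y hx0 hxl hy0 hyl
  rw [hlen] at hxl hyl
  rw [root_of_self (get_pyRange0 hx0 hxl), root_of_self (get_pyRange0 hy0 hyl),
      get_pyRange0 hx0 hxl, get_pyRange0 hy0 hyl]

lemma edge_bounds (land : List (List Int)) :
    ∀ e ∈ ((PySem.List.pyRange 0 ((land.length : Int))).flatMap
            (fun i => (PySem.List.pyRange 0 ((land.length : Int) - 1)).map (fun j => hEdge land i j)) ++
          (PySem.List.pyRange 0 ((land.length : Int) - 1)).flatMap
            (fun i => (PySem.List.pyRange 0 ((land.length : Int))).map (fun j => vEdge land i j))),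
      0 ≤ e.2.1 ∧ e.2.1 < (land.length : Int) * (land.length : Int) + 1 ∧
      0 ≤ e.2.2 ∧ e.2.2 < (land.length : Int) * (land.length : Int) + 1 := by
  intro e he
  set n : Int := (land.length : Int) with hn
  have hn0 : 0 ≤ n := by positivity
  rcases List.mem_append.mp he with hh | hh
  · obtain ⟨i, hi, hj⟩ := List.mem_flatMap.mp hh
    obtain ⟨j, hjm, rfl⟩ := List.mem_map.mp hj
    obtain ⟨hi0, hi1⟩ := PySem.List.mem_pyRange_one.mp hi
    obtain ⟨hj0, hj1⟩ := PySem.List.mem_pyRange_one.mp hjm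
    have h1 : n * i + n ≤ n * n := by nlinarith
    have h2 : 0 ≤ n * i := by positivity
    simp only [hEdge, ← hn]
    refine ⟨by omega, by omega, by omega, by omega⟩
  · obtain ⟨i, hi, hj⟩ := List.mem_flatMap.mp hh
    obtain ⟨j, hjm, rfl⟩ := List.mem_map.mp hj
    obtain ⟨hi0, hi1⟩ := PySem.List.mem_pyRange_one.mp hi
    obtain ⟨hj0, hj1⟩ := PySem.List.mem_pyRange_one.mp hjm
    have h1 : n * i + n ≤ n * n := by nlinarith
    have h2 : 0 ≤ n * i := by positivity
    have h3 : n * (i+1) + n ≤ n * n := by nlinarith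
    have h4 : 0 ≤ n * (i+1) := by positivity
    simp only [vEdge, ← hn]
    refine ⟨by omega, by omega, by omega, by omega⟩

lemma hEdgeB_eq (land : List (List Int)) (i j : Int) : hEdgeB land i j = hEdge land i j := by
  simp [hEdgeB, hEdge, Int.mul_comm]

lemma vEdgeB_eq (land : List (List Int)) (i j : Int) : vEdgeB land i j = vEdge land i j := by
  simp [vEdgeB, vEdge, Int.mul_comm]

lemma edges_eq (land : List (List Int)) :
    (PySem.List.pyRange 0 ((land.length : Int) - 1)).foldl (fun acc i =>
        (PySem.List.pyRange 0 ((land.length : Int))).foldl (fun acc j => acc ++ [vEdgeB land i j]) acc)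
      ((PySem.List.pyRange 0 ((land.length : Int))).foldl (fun acc i =>
        (PySem.List.pyRange 0 ((land.length : Int) - 1)).foldl (fun acc j => acc ++ [hEdgeB land i j]) acc) []) =
    (PySem.List.pyRange 0 ((land.length : Int))).flatMap
        (fun i => (PySem.List.pyRange 0 ((land.length : Int) - 1)).map (fun j => hEdge land i j)) ++
      (PySem.List.pyRange 0 ((land.length : Int) - 1)).flatMap
        (fun i => (PySem.List.pyRange 0 ((land.length : Int))).map (fun j => vEdge land i j)) := by
  simp only [PySem.List.foldl_append_singleton_eq_map, PySem.List.foldl_append_eq_flatMap,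
    List.nil_append, hEdgeB_eq, vEdgeB_eq]

lemma main_eq (land : List (List Int)) (height : Int) :
    solution land height = solution_alt land height := by
  simp only [solution, solution_alt]
  have hkey : edgeKeyB = edgeKey := rfl
  rw [hkey, edges_eq]
  have hcast : (land.length : Int) * (land.length : Int) + 1
      = ((land.length * land.length + 1 : Nat) : Int) := by push_cast; ring
  rw [hcast]
  refine fold_eq height _ _ _ 0 (inv_init _) ?_
  intro e he
  have hb := edge_bounds land e ((PySem.List.mem_sorted _ _ _ _).mp he)
  rw [length_pyRange0]
  push_cast
  push_cast at hb
  exact ⟨hb.1, by omega, hb.2.2.1, by omega⟩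

-- ===== VERDICT (by name: the statement is the Claim_ definition above) =====
theorem solution_spec : Claim_equal_solution := by
  intro land height _hdom _hpre
  unfold Spec_solution
  exact main_eq land height
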